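-- pv_equiv track=rewrite | github.com/aoduhabc/ToolFlow-Skill-Agent | python/agent_demo.py | _collect_recent_tool_evidence
-- ===== SOURCE A (Python) =====
-- from typing import Any, Dict, List, Optional, Set, Tuple
--
-- Message = Dict[str, Any]
--
-- def _truncate_text(value: str, max_len: int) -> str:
--     if len(value) <= max_len:
--         return value
--     return value[: max_len - 3] + "..."
--
-- def _collect_recent_tool_evidence(messages: List[Message], limit: int = 8, max_chars: int = 3500) -> str:
--     chunks: List[str] = []
--     for msg in reversed(messages):
--         if str(msg.get("role", "")).strip().lower() != "tool":
--             continue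
--         name = str(msg.get("name", "")).strip()
--         content = str(msg.get("content", "")).strip()
--         if not content:
--             continue
--         chunks.append(f"[{name}] {content}")
--         if len(chunks) >= limit:
--             break
--     chunks.reverse()
--     joined = "\n".join(chunks)
--     return _truncate_text(joined, max_chars)
-- ===== SOURCE B (Python) =====
-- from typing import Any, Dict, List
--
-- Message = Dict[str, Any]
--
-- def _truncate_text(value: str, max_len: int) -> str:
--     if len(value) <= max_len:
--         return value
--     return value[: max_len - 3] + "..."
--
-- def _collect_recent_tool_evidence(messages: List[Message], limit: int = 8, max_chars: int = 3500) -> str: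
--     all_chunks = [
--         f"[{str(m.get('name', '')).strip()}] {str(m.get('content', '')).strip()}"
--         for m in messages
--         if str(m.get('role', '')).strip().lower() == "tool"
--         and str(m.get('content', '')).strip()
--     ]
--     kept = all_chunks[-max(limit, 1):]
--     return _truncate_text("\n".join(kept), max_chars)
-- ===== Notes on version B (the rewrite author's own statement) =====
-- stated objective: simpler
-- what changed: Replaces the reversed scan with an early break and a final list reversal by a single forward comprehension over all messages followed by a tail slice all_chunks[-max(limit,1):] (max(limit,1) because A always keeps one chunk even when limit <= 1).
import Mathlib
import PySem

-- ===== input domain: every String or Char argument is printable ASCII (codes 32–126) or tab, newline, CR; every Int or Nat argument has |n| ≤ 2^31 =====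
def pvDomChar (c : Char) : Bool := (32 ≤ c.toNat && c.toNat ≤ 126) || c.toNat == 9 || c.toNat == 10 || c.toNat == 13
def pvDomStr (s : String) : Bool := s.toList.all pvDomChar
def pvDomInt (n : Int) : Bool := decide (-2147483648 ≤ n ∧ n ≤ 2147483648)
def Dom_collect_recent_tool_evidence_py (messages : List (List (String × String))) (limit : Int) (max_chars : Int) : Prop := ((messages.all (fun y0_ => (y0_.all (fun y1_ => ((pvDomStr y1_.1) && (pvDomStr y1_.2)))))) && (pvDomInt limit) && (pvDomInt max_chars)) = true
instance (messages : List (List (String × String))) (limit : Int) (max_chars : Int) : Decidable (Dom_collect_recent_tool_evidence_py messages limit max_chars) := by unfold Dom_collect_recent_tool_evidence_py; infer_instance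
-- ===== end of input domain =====

-- B replaces A's reversed scan with early break (then a final reversal) by one forward
-- comprehension plus the tail slice all_chunks[-max(limit,1):]; objective: simpler.

-- shared module helper _truncate_text (used verbatim by both Pythons)
def pvTruncate (value : String) (max_len : Int) : String :=
  if (PySem.Str.len value : Int) ≤ max_len then value
  else PySem.Str.slice value none (some (max_len - 3)) ++ "..."

-- str(msg.get("role","")).strip().lower()  (values are strings on this domain, str() is identity)
def pvRoleNorm (m : List (String × String)) : String :=
  PySem.Str.lower (PySem.Str.strip ((PySem.Dict.mk m).getD "role" ""))

def pvContent (m : List (String × String)) : String :=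
  PySem.Str.strip ((PySem.Dict.mk m).getD "content" "")

-- f"[{name}] {content}"
def pvChunk (m : List (String × String)) : String :=
  "[" ++ PySem.Str.strip ((PySem.Dict.mk m).getD "name" "") ++ "] " ++ pvContent m

-- ===== PORT A =====
-- the 'for msg in reversed(messages)' loop with 'continue'/'break', accumulator 'chunks'
def pvLoopA (limit : Int) : List (List (String × String)) → List String → List String
  | [], chunks => chunks
  | m :: rest, chunks =>
    if pvRoleNorm m ≠ "tool" then pvLoopA limit rest chunks
    else if pvContent m = "" then pvLoopA limit rest chunks
    else
      let chunks' := chunks ++ [pvChunk m]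
      if limit ≤ (chunks'.length : Int) then chunks' else pvLoopA limit rest chunks'

def collect_recent_tool_evidence_py (messages : List (List (String × String))) (limit : Int) (max_chars : Int) : String :=
  let chunks := pvLoopA limit messages.reverse []
  pvTruncate (PySem.Str.join "\n" chunks.reverse) max_chars

-- ===== PORT B =====
def collect_recent_tool_evidence_py_alt (messages : List (List (String × String))) (limit : Int) (max_chars : Int) : String :=
  let all_chunks := messages.filterMap
    (fun m => if pvRoleNorm m = "tool" ∧ pvContent m ≠ "" then some (pvChunk m) else none)
  let kept := PySem.List.slice all_chunks (some (-(max limit 1))) none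
  pvTruncate (PySem.Str.join "\n" kept) max_chars

-- ===== PRECONDITION & SPEC =====
def Spec_collect_recent_tool_evidence_py (messages : List (List (String × String))) (limit : Int) (max_chars : Int) (out : String) : Prop := out = collect_recent_tool_evidence_py_alt messages limit max_chars
instance (messages : List (List (String × String))) (limit : Int) (max_chars : Int) (out : String) : Decidable (Spec_collect_recent_tool_evidence_py messages limit max_chars out) := by unfold Spec_collect_recent_tool_evidence_py; infer_instance

-- ===== CLAIM (what is proved, stated in full; the proofs are below) =====
def Claim_equal_collect_recent_tool_evidence_py : Prop := ∀ (messages : List (List (String × String))) (limit : Int) (max_chars : Int), Dom_collect_recent_tool_evidence_py messages limit max_chars → Spec_collect_recent_tool_evidence_py messages limit max_chars (collect_recent_tool_evidence_py messages limit max_chars)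

-- ===== LEMMAS AND PROOFS =====

-- B's filter, as a function
def pvFilt (ms : List (List (String × String))) : List String :=
  ms.filterMap (fun m => if pvRoleNorm m = "tool" ∧ pvContent m ≠ "" then some (pvChunk m) else none)

-- A's loop keeps the first (max limit 1).toNat kept chunks of its remaining input
theorem pvLoopA_eq (limit : Int) (ms : List (List (String × String))) (chunks : List String)
    (h : chunks.length < (max limit 1).toNat) :
    pvLoopA limit ms chunks = chunks ++ (pvFilt ms).take ((max limit 1).toNat - chunks.length) := by
  induction ms generalizing chunks with
  | nil => simp [pvLoopA, pvFilt]
  | cons m rest ih =>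
    by_cases hrole : pvRoleNorm m = "tool"
    · by_cases hc : pvContent m = ""
      · rw [pvLoopA]
        simp only [hrole, hc]
        simp only [ne_eq, not_true_eq_false, if_false, if_true]
        rw [ih chunks h]
        simp [pvFilt, hrole, hc]
      · rw [pvLoopA]
        simp only [hrole, hc]
        simp only [ne_eq, not_true_eq_false, if_false]
        have hfilt : pvFilt (m :: rest) = pvChunk m :: pvFilt rest := by
          simp [pvFilt, hrole, hc]
        rw [hfilt]
        by_cases hbr : limit ≤ ((chunks ++ [pvChunk m]).length : Int)
        · simp only [hbr, if_true]
          have hlen : (max limit 1).toNat - chunks.length = 1 := by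
            simp only [List.length_append, List.length_singleton] at hbr
            omega
          rw [hlen]
          simp
        · simp only [hbr, if_false]
          have hlt : (chunks ++ [pvChunk m]).length < (max limit 1).toNat := by
            simp only [List.length_append, List.length_singleton] at hbr ⊢
            omega
          rw [ih _ hlt]
          have : (max limit 1).toNat - chunks.length = ((max limit 1).toNat - (chunks ++ [pvChunk m]).length) + 1 := by
            simp only [List.length_append, List.length_singleton] at hbr ⊢
            omega
          rw [this]
          simp [List.take_succ_cons]
    · rw [pvLoopA, if_pos hrole]
      rw [ih chunks h]
      simp [pvFilt, hrole]

-- the two chunk lists agree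
theorem pvChunks_eq (messages : List (List (String × String))) (limit : Int) :
    (pvLoopA limit messages.reverse []).reverse
      = PySem.List.slice (pvFilt messages) (some (-(max limit 1))) none := by
  have hk : 0 < (max limit 1).toNat := by omega
  have hcast : ((max limit 1).toNat : Int) = max limit 1 := by omega
  rw [← hcast, PySem.List.slice_from_neg_natCast _ _ hk]
  rw [pvLoopA_eq limit messages.reverse [] hk]
  have hrev : pvFilt messages.reverse = (pvFilt messages).reverse := by
    simp [pvFilt, List.filterMap_reverse]
  simp only [List.nil_append, List.length_nil, Nat.sub_zero, hrev]
  rw [List.reverse_take]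
  simp

-- ===== VERDICT (by name: the statement is the Claim_ definition above) =====
theorem collect_recent_tool_evidence_py_spec : Claim_equal_collect_recent_tool_evidence_py := by
  intro messages limit max_chars _
  show _ = _
  simp only [collect_recent_tool_evidence_py, collect_recent_tool_evidence_py_alt]
  rw [pvChunks_eq messages limit]
  rfl
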